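-- pv_equiv track=rewrite | github.com/Blanwhit/Waffle-Solver | get_acceptable_triples.py | canMakeStr2
-- ===== SOURCE A (Python) =====
-- def canMakeStr2(s1, s2):
--     count = {s1[i]: 0 for i in range(len(s1))}
--
--     for i in range(len(s1)):
--         count[s1[i]] += 1
--
--     for i in range(len(s2)):
--         if count.get(s2[i]) == None or count[s2[i]] == 0:
--             return False
--         count[s2[i]] -= 1
--     return True
-- ===== SOURCE B (Python) =====
-- def canMakeStr2(s1, s2):
--     c1 = {}
--     for ch in s1:
--         c1[ch] = c1.get(ch, 0) + 1
--     c2 = {}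
--     for ch in s2:
--         c2[ch] = c2.get(ch, 0) + 1
--     return all(c2[ch] <= c1.get(ch, 0) for ch in c2)
-- ===== Notes on version B (the rewrite author's own statement) =====
-- stated objective: idiomatic
-- what changed: B builds frequency tables for both strings and checks the multiset-subset condition in one pass over s2's distinct characters, instead of A's single table decremented with early returns while scanning s2.
import Mathlib
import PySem

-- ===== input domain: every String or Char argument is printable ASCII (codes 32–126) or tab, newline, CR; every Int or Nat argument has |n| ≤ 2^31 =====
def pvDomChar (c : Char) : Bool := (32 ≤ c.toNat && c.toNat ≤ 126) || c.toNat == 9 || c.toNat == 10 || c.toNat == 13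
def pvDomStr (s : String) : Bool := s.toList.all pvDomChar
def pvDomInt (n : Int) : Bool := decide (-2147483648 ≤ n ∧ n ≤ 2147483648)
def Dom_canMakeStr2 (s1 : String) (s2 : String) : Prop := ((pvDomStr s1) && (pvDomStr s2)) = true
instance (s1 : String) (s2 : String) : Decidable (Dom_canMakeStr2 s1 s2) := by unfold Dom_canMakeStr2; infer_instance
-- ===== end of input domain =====

-- B replaces A's single decremented count table (with early returns while scanning s2) by two
-- frequency tables compared once per distinct character of s2 (idiomatic; same cost).

-- ===== PORT A =====
-- A's second loop: for each char of s2 (in order), fail if the char is absent or its count is 0,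
-- else decrement and continue; returns True when the scan finishes.
def canMakeStr2Loop : List Char → PySem.Dict Char Int → Bool
  | [], _ => true
  | c :: rest, count =>
    if (count.get? c == none) || (count.getD c 0 == 0) then false
    else canMakeStr2Loop rest (count.modify c 0 (· - 1))

def canMakeStr2 (s1 : String) (s2 : String) : Bool :=
  -- count = {s1[i]: 0 for ...} then count[s1[i]] += 1 over s1
  let init := s1.toList.foldl (fun d c => d.insert c (0 : Int)) (PySem.Dict.empty : PySem.Dict Char Int)
  let count := s1.toList.foldl (fun d c => d.modify c 0 (· + 1)) init
  canMakeStr2Loop s2.toList count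

-- ===== PORT B =====
def canMakeStr2_alt (s1 : String) (s2 : String) : Bool :=
  let c1 := s1.toList.foldl (fun d c => d.insert c (d.getD c 0 + 1)) (PySem.Dict.empty : PySem.Dict Char Int)
  let c2 := s2.toList.foldl (fun d c => d.insert c (d.getD c 0 + 1)) (PySem.Dict.empty : PySem.Dict Char Int)
  c2.keys.all (fun ch => decide (c2.getD ch 0 ≤ c1.getD ch 0))

-- ===== PRECONDITION & SPEC =====
def Spec_canMakeStr2 (s1 : String) (s2 : String) (out : Bool) : Prop := out = canMakeStr2_alt s1 s2
instance (s1 : String) (s2 : String) (out : Bool) : Decidable (Spec_canMakeStr2 s1 s2 out) := by unfold Spec_canMakeStr2; infer_instance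

-- ===== CLAIM (what is proved, stated in full; the proofs are below) =====
def Claim_equal_canMakeStr2 : Prop := ∀ (s1 : String) (s2 : String), Dom_canMakeStr2 s1 s2 → Spec_canMakeStr2 s1 s2 (canMakeStr2 s1 s2)

-- ===== LEMMAS AND PROOFS =====

-- A's scanning loop succeeds iff every character of the remaining string has enough budget left.
theorem canMakeStr2Loop_eq (l2 : List Char) (d : PySem.Dict Char Int)
    (hnn : ∀ c, 0 ≤ d.getD c 0) :
    canMakeStr2Loop l2 d = decide (∀ c ∈ l2, (l2.count c : Int) ≤ d.getD c 0) := by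
  induction l2 generalizing d with
  | nil => simp [canMakeStr2Loop]
  | cons c rest ih =>
    have hcnt : (c :: rest).count c = rest.count c + 1 := by simp
    by_cases hz : d.getD c 0 = 0
    · have hfail : canMakeStr2Loop (c :: rest) d = false := by
        unfold canMakeStr2Loop
        rcases h : d.get? c with _ | v
        · simp
        · have hv : d.getD c 0 = v := PySem.Dict.getD_of_get?_eq_some d 0 h
          simp [← hv, hz]
      rw [hfail]
      have hnot : ¬ (∀ x ∈ c :: rest, ((c :: rest).count x : Int) ≤ d.getD x 0) := by
        intro hall
        have h1 := hall c (by simp)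
        rw [hz, hcnt] at h1
        omega
      exact (decide_eq_false hnot).symm
    · have hpos : 1 ≤ d.getD c 0 := by have := hnn c; omega
      have hsome : d.get? c ≠ none := by
        intro h
        exact hz (PySem.Dict.getD_of_get?_eq_none d 0 h)
      have hstep : canMakeStr2Loop (c :: rest) d
          = canMakeStr2Loop rest (d.modify c 0 (· - 1)) := by
        have hcond : ((d.get? c == none) || (d.getD c 0 == 0)) = false := by
          rcases h : d.get? c with _ | v
          · exact absurd h hsome
          · have hv : d.getD c 0 = v := PySem.Dict.getD_of_get?_eq_some d 0 h
            simp [← hv, hz]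
        show (if (d.get? c == none) || (d.getD c 0 == 0) then false
              else canMakeStr2Loop rest (d.modify c 0 (· - 1)))
            = canMakeStr2Loop rest (d.modify c 0 (· - 1))
        rw [hcond]
        rfl
      have hgd : ∀ x, (d.modify c 0 (· - 1)).getD x 0
          = if x = c then d.getD c 0 - 1 else d.getD x 0 := fun x =>
        PySem.Dict.getD_modify d c x 0 (· - 1)
      rw [hstep, ih _ (by intro x; rw [hgd x]; split <;> [omega; exact hnn x])]
      have hiff : (∀ x ∈ rest, (rest.count x : Int) ≤ (d.modify c 0 (· - 1)).getD x 0)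
          ↔ (∀ x ∈ c :: rest, ((c :: rest).count x : Int) ≤ d.getD x 0) := by
        constructor
        · intro hall x hx
          rcases List.mem_cons.mp hx with rfl | hx'
          · by_cases hcr : x ∈ rest
            · have h1 := hall x hcr
              rw [hgd x, if_pos rfl] at h1
              rw [hcnt]
              omega
            · rw [hcnt, List.count_eq_zero_of_not_mem hcr]
              omega
          · by_cases hxc : x = c
            · subst hxc
              have h1 := hall x hx'
              rw [hgd x, if_pos rfl] at h1
              rw [hcnt]
              omega
            · have h1 := hall x hx'
              rw [hgd x, if_neg hxc] at h1
              have h2 : (c :: rest).count x = rest.count x := by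
                simp [Ne.symm hxc]
              rw [h2]
              exact h1
        · intro hall x hx
          rw [hgd x]
          by_cases hxc : x = c
          · subst hxc
            have h1 := hall x (by simp)
            rw [hcnt] at h1
            rw [if_pos rfl]
            omega
          · have h1 := hall x (List.mem_cons_of_mem _ hx)
            have h2 : (c :: rest).count x = rest.count x := by
              simp [Ne.symm hxc]
            rw [h2] at h1
            rw [if_neg hxc]
            exact h1
      simp only [decide_eq_decide]
      exact hiff

-- A's count table after both build loops holds exactly the multiplicities of s1.
theorem count_table_getD (l1 : List Char) (c : Char) :
    ((l1.foldl (fun d c => d.modify c 0 (· + 1))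
        (l1.foldl (fun d c => d.insert c (0 : Int)) (PySem.Dict.empty : PySem.Dict Char Int))).getD c 0)
      = (l1.count c : Int) := by
  rw [PySem.Dict.getD_foldl_modify_add_one]
  have hzero : ∀ (d : PySem.Dict Char Int), d.getD c 0 = 0 →
      (l1.foldl (fun d c => d.insert c (0 : Int)) d).getD c 0 = 0 := by
    intro d hd
    induction l1 generalizing d with
    | nil => simpa using hd
    | cons x xs ih =>
      simp only [List.foldl_cons]
      apply ih
      rw [PySem.Dict.getD_insert]
      split <;> simp [hd]
  rw [hzero _ (PySem.Dict.getD_empty c 0)]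
  omega

theorem canMakeStr2_spec : Claim_equal_canMakeStr2 := by
  unfold Claim_equal_canMakeStr2 Spec_canMakeStr2
  intro s1 s2 _
  unfold canMakeStr2 canMakeStr2_alt
  simp only [PySem.Dict.foldl_insert_getD_add_one_eq_counter]
  rw [canMakeStr2Loop_eq _ _ (by intro c; rw [count_table_getD]; positivity)]
  rw [Bool.eq_iff_iff]
  simp only [List.all_eq_true, decide_eq_true_eq, PySem.Dict.keys_counter,
    PySem.Dict.getD_counter]
  constructor
  · intro h c hc
    have hc' : c ∈ s2.toList := (PySem.Set.mem_ofList s2.toList c).mp hc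
    have h1 := h c hc'
    rw [count_table_getD] at h1
    exact h1
  · intro h c hc
    rw [count_table_getD]
    exact h c ((PySem.Set.mem_ofList s2.toList c).mpr hc)
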